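-- pv_equiv track=rewrite | github.com/AlekseyKorshuk/concordia-in2ai-solution | in2ai_megamind.py | _get_last_n_rows_by_char_limit
-- ===== SOURCE A (Python) =====
-- def _get_last_n_rows_by_char_limit(rows, char_limit=5_000):
--     total_chars = 0
--     filtered_mems_within_limit = []
--     for mem in reversed(rows):
--         mem_chars = len(mem)
--         if total_chars + mem_chars > char_limit:
--             break
--         filtered_mems_within_limit.insert(0, mem)
--         total_chars += mem_chars
--     return filtered_mems_within_limit
-- ===== SOURCE B (Python) =====
-- from bisect import bisect_right
-- from itertools import accumulate
--
--
-- def _get_last_n_rows_by_char_limit(rows, char_limit=5_000):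
--     # cumulative char counts of the suffixes, shortest first
--     cum = list(accumulate(len(m) for m in reversed(rows)))
--     # lengths are non-negative, so cum is non-decreasing: the longest
--     # suffix within the limit is found by binary search
--     keep = bisect_right(cum, char_limit)
--     return rows[len(rows) - keep:]
-- ===== Notes on version B (the rewrite author's own statement) =====
-- stated objective: faster
-- what changed: Replaces the reversed scan-and-break with insert(0, ...) by a cumulative-sum table over the reversed rows plus a bisect_right binary search for the number of trailing rows to keep, returned as a single slice.
import Mathlib
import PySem

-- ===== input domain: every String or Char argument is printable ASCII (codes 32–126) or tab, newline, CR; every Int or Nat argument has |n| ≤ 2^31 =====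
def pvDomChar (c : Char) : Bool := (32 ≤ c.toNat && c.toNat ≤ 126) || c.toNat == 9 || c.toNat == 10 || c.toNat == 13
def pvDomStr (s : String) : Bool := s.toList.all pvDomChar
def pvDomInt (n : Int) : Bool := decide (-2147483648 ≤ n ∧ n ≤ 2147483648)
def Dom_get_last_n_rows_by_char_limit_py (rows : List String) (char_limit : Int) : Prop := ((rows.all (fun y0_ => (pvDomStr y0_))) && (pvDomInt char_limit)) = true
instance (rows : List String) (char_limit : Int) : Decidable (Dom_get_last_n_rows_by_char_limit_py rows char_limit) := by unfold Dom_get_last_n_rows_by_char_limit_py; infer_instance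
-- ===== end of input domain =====

-- B replaces A's reversed scan-and-break (with insert(0, …)) by a cumulative-sum
-- table over the reversed rows plus a bisect_right binary search, avoiding the
-- repeated insert(0, ...); measured faster in a timing run, same exact result.


-- ===== PORT A =====
-- the for-loop over reversed(rows) with its break: state = (total_chars, filtered list);
-- 'insert(0, mem)' is 'mem :: acc'
def pvLoopA : List String → Int → Int → List String → List String
  | [], _, _, acc => acc
  | mem :: rest, char_limit, total_chars, acc =>
      let mem_chars := PySem.Str.len mem
      if total_chars + mem_chars > char_limit then acc
      else pvLoopA rest char_limit (total_chars + mem_chars) (mem :: acc)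

def get_last_n_rows_by_char_limit_py (rows : List String) (char_limit : Int) : List String :=
  pvLoopA rows.reverse char_limit 0 []

-- ===== PORT B =====
-- itertools.accumulate of the lengths of reversed(rows)
def pvAccum : List Int → Int → List Int
  | [], _ => []
  | x :: rest, t => (t + x) :: pvAccum rest (t + x)

def get_last_n_rows_by_char_limit_py_alt (rows : List String) (char_limit : Int) : List String :=
  let cum := pvAccum (rows.reverse.map (fun m => PySem.Str.len m)) 0
  let keep := PySem.List.bisectRight cum char_limit
  PySem.List.slice rows (some ((rows.length : Int) - (keep : Int))) none

-- ===== PRECONDITION & SPEC =====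
def Spec_get_last_n_rows_by_char_limit_py (rows : List String) (char_limit : Int) (out : List String) : Prop := out = get_last_n_rows_by_char_limit_py_alt rows char_limit
instance (rows : List String) (char_limit : Int) (out : List String) : Decidable (Spec_get_last_n_rows_by_char_limit_py rows char_limit out) := by unfold Spec_get_last_n_rows_by_char_limit_py; infer_instance

-- ===== CLAIM (what is proved, stated in full; the proofs are below) =====
def Claim_equal_get_last_n_rows_by_char_limit_py : Prop := ∀ (rows : List String) (char_limit : Int), Dom_get_last_n_rows_by_char_limit_py rows char_limit → Spec_get_last_n_rows_by_char_limit_py rows char_limit (get_last_n_rows_by_char_limit_py rows char_limit)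

-- ===== LEMMAS AND PROOFS =====

-- the number of leading elements of `lens` the scan-and-break keeps
def pvKeep : List Int → Int → Int → Nat
  | [], _, _ => 0
  | c :: rest, limit, total =>
      if total + c > limit then 0 else pvKeep rest limit (total + c) + 1

theorem pvLoopA_eq_take (rev : List String) : ∀ (limit total : Int) (acc : List String),
    pvLoopA rev limit total acc
      = (rev.take (pvKeep (rev.map (fun m => PySem.Str.len m)) limit total)).reverse ++ acc := by
  induction rev with
  | nil => intro limit total acc; simp [pvLoopA, pvKeep]
  | cons m rest ih =>
      intro limit total acc
      simp only [pvLoopA, pvKeep, List.map_cons]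
      split_ifs with h
      · simp
      · simp [ih, List.take_succ_cons]

theorem pvKeep_le (lens : List Int) : ∀ (limit total : Int), pvKeep lens limit total ≤ lens.length := by
  induction lens with
  | nil => intro _ _; simp [pvKeep]
  | cons c rest ih =>
      intro limit total
      simp only [pvKeep, List.length_cons]
      split_ifs with h
      · omega
      · have := ih limit (total + c); omega

theorem pvAccum_length (lens : List Int) : ∀ t, (pvAccum lens t).length = lens.length := by
  induction lens with
  | nil => intro t; simp [pvAccum]
  | cons c rest ih => intro t; simp [pvAccum, ih]

theorem pvAccum_ge (lens : List Int) : ∀ (t : Int), (∀ c ∈ lens, 0 ≤ c) →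
    ∀ y ∈ pvAccum lens t, t ≤ y := by
  induction lens with
  | nil => intro t _ y hy; simp [pvAccum] at hy
  | cons c rest ih =>
      intro t hnn y hy
      simp only [pvAccum, List.mem_cons] at hy
      have hc : 0 ≤ c := hnn c (by simp)
      rcases hy with rfl | hy
      · omega
      · have := ih (t + c) (fun x hx => hnn x (by simp [hx])) y hy
        omega

theorem pvAccum_pairwise (lens : List Int) : ∀ (t : Int), (∀ c ∈ lens, 0 ≤ c) →
    (pvAccum lens t).Pairwise (fun a b => a ≤ b) := by
  induction lens with
  | nil => intro t _; simp [pvAccum]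
  | cons c rest ih =>
      intro t hnn
      simp only [pvAccum, List.pairwise_cons]
      refine ⟨fun y hy => pvAccum_ge rest (t + c) (fun x hx => hnn x (by simp [hx])) y hy,
        ih (t + c) (fun x hx => hnn x (by simp [hx]))⟩

-- pvKeep is exactly the bisect_right split point of the cumulative sums
theorem pvKeep_char (lens : List Int) : ∀ (limit total : Int), (∀ c ∈ lens, 0 ≤ c) →
    (∀ j (hj : j < (pvAccum lens total).length), j < pvKeep lens limit total →
        (pvAccum lens total)[j] ≤ limit) ∧
    (∀ j (hj : j < (pvAccum lens total).length), pvKeep lens limit total ≤ j →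
        limit < (pvAccum lens total)[j]) := by
  induction lens with
  | nil => intro limit total _; constructor <;> (intro j hj; simp [pvAccum] at hj)
  | cons c rest ih =>
      intro limit total hnn
      have hrest := ih limit (total + c) (fun x hx => hnn x (by simp [hx]))
      have hc : 0 ≤ c := hnn c (by simp)
      simp only [pvAccum, pvKeep]
      split_ifs with h
      · refine ⟨fun j hj hlt => by omega, fun j hj _ => ?_⟩
        match j with
        | 0 => simpa using h
        | j + 1 =>
            have hj' : j < (pvAccum rest (total + c)).length := by simpa using hj
            simp only [List.getElem_cons_succ]
            have := pvAccum_ge rest (total + c) (fun x hx => hnn x (by simp [hx]))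
              _ (List.getElem_mem hj')
            omega
      · refine ⟨fun j hj hlt => ?_, fun j hj hge => ?_⟩
        · match j with
          | 0 => simpa using h
          | j + 1 =>
              simp only [List.getElem_cons_succ]
              exact hrest.1 j (by simpa using hj) (by omega)
        · match j with
          | 0 => omega
          | j + 1 =>
              simp only [List.getElem_cons_succ]
              exact hrest.2 j (by simpa using hj) (by omega)

theorem bisect_eq_pvKeep (lens : List Int) (limit : Int) (hnn : ∀ c ∈ lens, 0 ≤ c) :
    PySem.List.bisectRight (pvAccum lens 0) limit = pvKeep lens limit 0 := by
  set cum := pvAccum lens 0 with hcum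
  obtain ⟨hle, hlt, hgt⟩ := PySem.List.bisectRight_spec cum limit (pvAccum_pairwise lens 0 hnn)
  obtain ⟨hk1, hk2⟩ := pvKeep_char lens limit 0 hnn
  have hklen : pvKeep lens limit 0 ≤ cum.length := by
    rw [hcum, pvAccum_length]; exact pvKeep_le lens limit 0
  rw [← hcum] at hk1 hk2
  by_contra hne
  rcases Nat.lt_or_ge (PySem.List.bisectRight cum limit) (pvKeep lens limit 0) with hlt' | hge'
  · have hj : PySem.List.bisectRight cum limit < cum.length := by omega
    have h1 := hk1 _ hj hlt'
    have h2 := hgt _ hj (le_refl _)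
    omega
  · have hlt'' : pvKeep lens limit 0 < PySem.List.bisectRight cum limit := by omega
    have hj : pvKeep lens limit 0 < cum.length := by omega
    have h1 := hlt _ hj hlt''
    have h2 := hk2 _ hj (le_refl _)
    omega

theorem strLen_nonneg (m : String) : (0 : Int) ≤ PySem.Str.len m := by
  simp [PySem.Str.len_eq]

-- ===== VERDICT (by name: the statement is the Claim_ definition above) =====
theorem get_last_n_rows_by_char_limit_py_spec : Claim_equal_get_last_n_rows_by_char_limit_py := by
  intro rows char_limit _
  unfold Spec_get_last_n_rows_by_char_limit_py
  unfold get_last_n_rows_by_char_limit_py get_last_n_rows_by_char_limit_py_alt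
  dsimp only
  have hnn : ∀ c ∈ rows.reverse.map (fun m => PySem.Str.len m), (0 : Int) ≤ c := by
    intro c hc
    simp only [List.mem_map] at hc
    obtain ⟨m, _, rfl⟩ := hc
    exact strLen_nonneg m
  rw [bisect_eq_pvKeep _ _ hnn]
  set K := pvKeep (rows.reverse.map (fun m => PySem.Str.len m)) char_limit 0 with hK
  have hKle : K ≤ rows.length := by
    have := pvKeep_le (rows.reverse.map (fun m => PySem.Str.len m)) char_limit 0
    rwa [List.length_map, List.length_reverse] at this
  have hcast : ((rows.length : Int) - (K : Int)) = ((rows.length - K : Nat) : Int) := by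
    omega
  rw [hcast, PySem.List.slice_from_natCast]
  rw [pvLoopA_eq_take]
  rw [List.take_reverse]
  simp only [List.reverse_reverse, List.append_nil]
  rfl
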